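-- pv_equiv track=rewrite | github.com/youssefsaber0/Ai_connect4 | src/heuristics.py | max_horiz
-- ===== SOURCE A (Python) =====
-- def max_horiz(game, i, j, visited):
--     if j == 6:
--         visited[i][j][0] = True
--         return 1
--     if j + 1 > 6:
--         return 0
--     if game[i][j] != game[i][j + 1]:
--         visited[i][j][0] = True
--         return 1
--     if game[i][j] == game[i][j + 1]:
--         visited[i][j][0] = True
--         return max_horiz(game, i, j + 1, visited) + 1
-- ===== SOURCE B (Python) =====
-- def max_horiz(game, i, j, visited):
--     if j >= 7:
--         return 0
--     row = game[i]
--     jj = j if j >= 0 else j + len(row)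
--     end = jj
--     while end < 6 and row[end] == row[end + 1]:
--         end += 1
--     for k in range(jj, end + 1):
--         visited[i][k][0] = True
--     return end - jj + 1
-- ===== Notes on version B (the rewrite author's own statement) =====
-- stated objective: simpler
-- what changed: B replaces A's branch-per-case recursion by a single iterative scan that finds the end of the run and returns end - start + 1 (marking the visited cells in one range loop), after normalizing a negative start index once.
-- intended difference: For negative j in [-7,-1] when every cell from column j+7 to column 6 equals the row's first cell, Python's negative indexing makes A compare column 6 with column 0 and keep counting past the right edge from column 0, returning an inflated count for a non-contiguous 'run' (e.g. 8 on a constant row with j=-1), while B returns the length of the real run ending at column 6 (1 there), which is the intended value. — e.g. on max_horiz([[0, 0, 0, 0, 0, 0, 0]], 0, -1, [[[false], [false], [false], [false], [false], [false], [false]]]): A returns 8, B returns 1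
-- outside the precondition, e.g. on max_horiz([[1, 2, 3]], 0, 1, [[[False], [False], [False]]]): A returns 1, B returns 1
import Mathlib
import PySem

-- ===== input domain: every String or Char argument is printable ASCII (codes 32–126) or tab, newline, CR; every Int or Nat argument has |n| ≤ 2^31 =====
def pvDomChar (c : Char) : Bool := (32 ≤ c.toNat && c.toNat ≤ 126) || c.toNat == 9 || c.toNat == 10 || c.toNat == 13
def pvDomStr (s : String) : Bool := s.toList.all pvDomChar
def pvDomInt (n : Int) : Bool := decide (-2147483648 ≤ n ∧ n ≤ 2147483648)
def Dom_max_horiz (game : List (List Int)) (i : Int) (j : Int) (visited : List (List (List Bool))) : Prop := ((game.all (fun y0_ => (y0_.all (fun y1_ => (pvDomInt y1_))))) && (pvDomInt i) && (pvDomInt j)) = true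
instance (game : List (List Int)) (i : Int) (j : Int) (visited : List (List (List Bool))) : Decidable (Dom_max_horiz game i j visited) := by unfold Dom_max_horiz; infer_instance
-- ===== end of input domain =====

-- B replaces A's recursion by a single scan for the end of the run plus arithmetic (objective: simpler).
-- Both Pythons mutate `visited`; the equivalence proved here is about the RETURN value only
-- (outside D_ the two Pythons also set the same visited flags).

-- ===== PORT A =====
-- Literal transliteration of A; `visited[i][j][0] = True` is a mutation that does not
-- affect the return value, so it does not appear (inputs where it would raise are outside Pre_).
def max_horiz (game : List (List Int)) (i : Int) (j : Int) (visited : List (List (List Bool))) : Int :=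
  if j = 6 then 1
  else if j + 1 > 6 then 0
  else if (PySem.List.pyGet? ((PySem.List.pyGet? game i).getD []) j).getD 0
          ≠ (PySem.List.pyGet? ((PySem.List.pyGet? game i).getD []) (j + 1)).getD 0 then 1
  else max_horiz game i (j + 1) visited + 1
termination_by (7 - j).toNat
decreasing_by omega

-- ===== PORT B =====
-- the while loop of Source B: advance `end` while the next cell continues the run
def runEnd (row : List Int) (e : Int) : Int :=
  if e < 6 ∧ (PySem.List.pyGet? row e).getD 0 = (PySem.List.pyGet? row (e + 1)).getD 0
  then runEnd row (e + 1) else e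
termination_by (6 - e).toNat
decreasing_by omega

def max_horiz_alt (game : List (List Int)) (i : Int) (j : Int) (visited : List (List (List Bool))) : Int :=
  if 7 ≤ j then 0
  else
    let row := (PySem.List.pyGet? game i).getD []
    let jj := if 0 ≤ j then j else j + (row.length : Int)
    runEnd row jj - jj + 1

-- ===== PRECONDITION & SPEC =====
-- Pre_ admits every j >= 7 (A returns 0 without touching the board) and otherwise requires:
-- i a valid (possibly negative) index of game and visited, visited's row i at least 7 cells
-- long with nonempty cells, -7 <= j, and game's row i at least 7 cells long (exactly 7 when
-- j is negative, since A's behaviour under Python's negative indexing depends on the row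
-- width matching A's hard-coded column bound 6).  Rows narrower than 7 are excluded because
-- A's scan usually runs off the row (IndexError); on such boards A can still return when an
-- unequal pair or j ≥ 7 stops it early (see cites).
def Pre_max_horiz (game : List (List Int)) (i : Int) (j : Int) (visited : List (List (List Bool))) : Prop :=
  7 ≤ j ∨
    (PySem.Raise.InRange game.length i ∧ PySem.Raise.InRange visited.length i ∧
     7 ≤ ((PySem.List.pyGet? visited i).getD []).length ∧
     (∀ c ∈ (PySem.List.pyGet? visited i).getD [], c ≠ []) ∧
     -7 ≤ j ∧
     (if 0 ≤ j then 7 ≤ ((PySem.List.pyGet? game i).getD []).length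
      else ((PySem.List.pyGet? game i).getD []).length = 7))
instance (game : List (List Int)) (i : Int) (j : Int) (visited : List (List (List Bool))) : Decidable (Pre_max_horiz game i j visited) := by unfold Pre_max_horiz; infer_instance

def pvWitness_max_horiz : List (List Int) × Int × Int × List (List (List Bool)) :=
  ([[0, 1, 0, 1, 0, 1, 0]], 0, 0,
   [[[false], [false], [false], [false], [false], [false], [false]]])

-- On negative j (a quirk: Python's negative indexing makes A compare the last cell with the
-- first) whenever the row's tail from column j+7 is constant, A wraps around the row end and
-- keeps counting from column 0, returning an inflated count for a non-contiguous "run", while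
-- B returns the length of the real run ending at column 6, which is the intended value.
def D_max_horiz (game : List (List Int)) (i : Int) (j : Int) (visited : List (List (List Bool))) : Prop :=
  -7 ≤ j ∧ j ≤ -1 ∧
  (let r := (PySem.List.pyGet? game i).getD []; r.drop (j + 7).toNat ⊆ [r.headD 0])
instance (game : List (List Int)) (i : Int) (j : Int) (visited : List (List (List Bool))) : Decidable (D_max_horiz game i j visited) := by unfold D_max_horiz; infer_instance

def Spec_max_horiz (game : List (List Int)) (i : Int) (j : Int) (visited : List (List (List Bool))) (out : Int) : Prop := ¬ D_max_horiz game i j visited → out = max_horiz_alt game i j visited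
instance (game : List (List Int)) (i : Int) (j : Int) (visited : List (List (List Bool))) (out : Int) : Decidable (Spec_max_horiz game i j visited out) := by unfold Spec_max_horiz; infer_instance

def pvDiffWitness_max_horiz : List (List Int) × Int × Int × List (List (List Bool)) :=
  ([[0, 0, 0, 0, 0, 0, 0]], 0, -1,
   [[[false], [false], [false], [false], [false], [false], [false]]])

def pvDiffWitnessOut_max_horiz : Int × Int := (8, 1)

-- ===== CLAIM (what is proved, stated in full; the proofs are below) =====
def Claim_unchanged_max_horiz : Prop := ∀ (game : List (List Int)) (i : Int) (j : Int) (visited : List (List (List Bool))), Dom_max_horiz game i j visited → Pre_max_horiz game i j visited → Spec_max_horiz game i j visited (max_horiz game i j visited)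
def Claim_changed_max_horiz : Prop := Dom_max_horiz (pvDiffWitness_max_horiz.1) (pvDiffWitness_max_horiz.2.1) (pvDiffWitness_max_horiz.2.2.1) (pvDiffWitness_max_horiz.2.2.2) ∧ Pre_max_horiz (pvDiffWitness_max_horiz.1) (pvDiffWitness_max_horiz.2.1) (pvDiffWitness_max_horiz.2.2.1) (pvDiffWitness_max_horiz.2.2.2) ∧ D_max_horiz (pvDiffWitness_max_horiz.1) (pvDiffWitness_max_horiz.2.1) (pvDiffWitness_max_horiz.2.2.1) (pvDiffWitness_max_horiz.2.2.2) ∧ max_horiz (pvDiffWitness_max_horiz.1) (pvDiffWitness_max_horiz.2.1) (pvDiffWitness_max_horiz.2.2.1) (pvDiffWitness_max_horiz.2.2.2) = pvDiffWitnessOut_max_horiz.1 ∧ max_horiz_alt (pvDiffWitness_max_horiz.1) (pvDiffWitness_max_horiz.2.1) (pvDiffWitness_max_horiz.2.2.1) (pvDiffWitness_max_horiz.2.2.2) = pvDiffWitnessOut_max_horiz.2 ∧ pvDiffWitnessOut_max_horiz.1 ≠ pvDiffWitnessOut_max_horiz.2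
def Claim_exact_max_horiz : Prop := ∀ (game : List (List Int)) (i : Int) (j : Int) (visited : List (List (List Bool))), Dom_max_horiz game i j visited → Pre_max_horiz game i j visited → D_max_horiz game i j visited → max_horiz game i j visited ≠ max_horiz_alt game i j visited

-- ===== LEMMAS AND PROOFS =====

-- proof-side shorthand for Python's row[k] (defaulted; indices are valid wherever it is used)
def cellD (row : List Int) (k : Int) : Int := (PySem.List.pyGet? row k).getD 0

theorem pyGet?_neg_shift {α : Type} (row : List α) (j : Int) (hl : row.length = 7)
    (h1 : -7 ≤ j) (h2 : j < 0) :
    PySem.List.pyGet? row j = PySem.List.pyGet? row (j + 7) := by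
  unfold PySem.List.pyGet? PySem.List.pyIdx?
  rw [hl]
  have hn : ¬ (0 ≤ j) := by omega
  have h7 : ((7 : Nat) : Int) = 7 := by norm_num
  rw [if_neg hn, if_pos (by omega), if_pos (by omega), if_pos (by omega)]
  have : (7 - (-j).toNat) = (j + 7).toNat := by omega
  rw [this]

theorem runEnd_stop (row : List Int) (e : Int)
    (h : ¬ (e < 6 ∧ (PySem.List.pyGet? row e).getD 0 = (PySem.List.pyGet? row (e + 1)).getD 0)) :
    runEnd row e = e := by
  rw [runEnd, if_neg h]

theorem runEnd_step (row : List Int) (e : Int) (h1 : e < 6)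
    (h2 : (PySem.List.pyGet? row e).getD 0 = (PySem.List.pyGet? row (e + 1)).getD 0) :
    runEnd row e = runEnd row (e + 1) := by
  rw [runEnd, if_pos ⟨h1, h2⟩]

theorem cellD_getElem (row : List Int) (k : Int) (h0 : 0 ≤ k) (h1 : k < row.length) :
    cellD row k = row[k.toNat]'(by omega) := by
  unfold cellD
  rw [PySem.List.pyGet?_of_nonneg _ h0, List.getElem?_eq_getElem (by omega)]
  rfl

theorem headD_getElem (row : List Int) (h : 0 < row.length) :
    row.headD 0 = row[0]'h := by
  cases row with
  | nil => simp at h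
  | cons a t => rfl

-- main equivalence lemma
theorem A_eq_runEnd (game : List (List Int)) (i : Int) (v : List (List (List Bool)))
    (row : List Int) (hrow : row = (PySem.List.pyGet? game i).getD []) (hl : row.length = 7) :
    ∀ (n : Nat) (j : Int), -7 ≤ j → j ≤ 6 → (6 - j).toNat ≤ n →
    (j < 0 → ¬ ∀ x ∈ row.drop (j + 7).toNat, x = row.headD 0) →
    max_horiz game i j v
      = runEnd row (if 0 ≤ j then j else j + 7) - (if 0 ≤ j then j else j + 7) + 1 := by
  intro n
  induction n with
  | zero =>
    intro j h1 h2 hm _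
    have hj : j = 6 := by omega
    subst hj
    rw [max_horiz, if_pos rfl, if_pos (by norm_num), runEnd_stop row 6 (by omega)]
    norm_num
  | succ m ih =>
    intro j h1 h2 hm hND
    by_cases hj6 : j = 6
    · subst hj6
      rw [max_horiz, if_pos rfl, if_pos (by norm_num), runEnd_stop row 6 (by omega)]
      norm_num
    · have hj5 : j ≤ 5 := by omega
      rw [max_horiz, if_neg hj6, if_neg (by omega), ← hrow]
      by_cases hneg : 0 ≤ j
      · -- nonnegative j
        rw [if_pos hneg]
        by_cases heq : cellD row j = cellD row (j + 1)
        · rw [if_neg (by simpa [cellD] using heq)]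
          have hrec := ih (j + 1) (by omega) (by omega) (by omega) (by omega)
          rw [if_pos (by omega)] at hrec
          rw [hrec, runEnd_step row j (by omega) (by simpa [cellD] using heq)]
          ring
        · rw [if_pos (by simpa [cellD] using heq),
              runEnd_stop row j (fun hc => heq (by simpa [cellD] using hc.2))]
          ring
      · -- negative j
        rw [if_neg hneg]
        have hsh : PySem.List.pyGet? row j = PySem.List.pyGet? row (j + 7) :=
          pyGet?_neg_shift row j hl (by omega) (by omega)
        have hND' := hND (by omega)
        by_cases hj1 : j = -1
        · -- j = -1 : compares row[6] with row[0]; ¬D gives them unequal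
          subst hj1
          have hd : List.drop ((-1 : Int) + 7).toNat row = [row[6]'(by omega)] := by
            have h6 : ((-1 : Int) + 7).toNat = 6 := by decide
            rw [h6, List.drop_eq_getElem_cons (by omega)]
            have : List.drop 7 row = [] := List.drop_eq_nil_of_le (by omega)
            simp [this]
          have hne : row[6]'(by omega) ≠ row.headD 0 := by
            intro hcontra
            apply hND'
            intro x hx
            rw [hd, List.mem_singleton] at hx
            rw [hx]; exact hcontra
          have hcell6 : cellD row ((-1 : Int) + 7) = row[6]'(by omega) := by
            have := cellD_getElem row 6 (by omega) (by omega)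
            simpa using this
          have hcell0 : cellD row ((-1 : Int) + 1) = row.headD 0 := by
            have := cellD_getElem row 0 (by omega) (by omega)
            rw [headD_getElem row (by omega)]
            simpa using this
          rw [if_pos (by
            show ¬ cellD row (-1) = cellD row ((-1 : Int) + 1)
            have : cellD row (-1) = cellD row ((-1 : Int) + 7) := by
              simp only [cellD]; rw [hsh]
            rw [this, hcell6, hcell0]
            exact hne),
            runEnd_stop row ((-1 : Int) + 7) (by omega)]
          norm_num
        · -- -7 ≤ j ≤ -2
          have hsh1 : PySem.List.pyGet? row (j + 1) = PySem.List.pyGet? row (j + 7 + 1) := by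
            have h := pyGet?_neg_shift row (j + 1) hl (by omega) (by omega)
            rw [h]
            congr 1
            ring
          by_cases heq : cellD row (j + 7) = cellD row (j + 7 + 1)
          · -- equal: one recursive step
            rw [if_neg (by
              show ¬ cellD row j ≠ cellD row (j + 1)
              simp only [cellD, hsh, hsh1, ne_eq, not_not]
              simpa [cellD] using heq)]
            -- ¬D propagates to j+1
            have hND2 : (j + 1) < 0 → ¬ ∀ x ∈ List.drop ((j + 1) + 7).toNat row, x = row.headD 0 := by
              intro _ hall
              apply hND'
              intro x hx
              have hlt : (j + 7).toNat < row.length := by omega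
              rw [List.drop_eq_getElem_cons hlt, List.mem_cons] at hx
              have htN : ((j + 1) + 7).toNat = (j + 7).toNat + 1 := by omega
              rcases hx with hx | hx
              · have h8 : cellD row (j + 7 + 1) = row.headD 0 := by
                  rw [cellD_getElem row (j + 7 + 1) (by omega) (by omega)]
                  refine hall _ ?_
                  have h' : ((j + 1) + 7).toNat = (j + 7 + 1).toNat := by omega
                  rw [h', List.drop_eq_getElem_cons (by omega : (j + 7 + 1).toNat < row.length)]
                  exact List.mem_cons_self
                have h7 : cellD row (j + 7) = row[(j + 7).toNat]'hlt :=
                  cellD_getElem row (j + 7) (by omega) (by omega)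
                rw [hx, ← h7, heq, h8]
              · apply hall
                rw [htN]
                exact hx
            have hrec := ih (j + 1) (by omega) (by omega) (by omega) hND2
            rw [if_neg (by omega)] at hrec
            have hplus : (j + 1) + 7 = (j + 7) + 1 := by ring
            rw [hplus] at hrec
            rw [hrec, runEnd_step row (j + 7) (by omega) (by simpa [cellD] using heq)]
            ring
          · -- unequal: both stop immediately
            rw [if_pos (by
              show cellD row j ≠ cellD row (j + 1)
              simp only [cellD, hsh, hsh1]
              simpa [cellD] using heq),
                runEnd_stop row (j + 7) (fun hc => heq (by simpa [cellD] using hc.2))]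
            ring


theorem A_eq_runEnd_nn (game : List (List Int)) (i : Int) (v : List (List (List Bool)))
    (row : List Int) (hrow : row = (PySem.List.pyGet? game i).getD []) :
    ∀ (n : Nat) (j : Int), 0 ≤ j → j ≤ 6 → (6 - j).toNat ≤ n →
    max_horiz game i j v = runEnd row j - j + 1 := by
  intro n
  induction n with
  | zero =>
    intro j h1 h2 hm
    have hj : j = 6 := by omega
    subst hj
    rw [max_horiz, if_pos rfl, runEnd_stop row 6 (by omega)]
    norm_num
  | succ m ih =>
    intro j h1 h2 hm
    by_cases hj6 : j = 6
    · subst hj6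
      rw [max_horiz, if_pos rfl, runEnd_stop row 6 (by omega)]
      norm_num
    · rw [max_horiz, if_neg hj6, if_neg (by omega), ← hrow]
      by_cases heq : cellD row j = cellD row (j + 1)
      · rw [if_neg (by simpa [cellD] using heq)]
        rw [ih (j + 1) (by omega) (by omega) (by omega)]
        rw [runEnd_step row j (by omega) (by simpa [cellD] using heq)]
        ring
      · rw [if_pos (by simpa [cellD] using heq),
            runEnd_stop row j (fun hc => heq (by simpa [cellD] using hc.2))]
        ring

theorem head_drop (row : List Int) (k : Nat) (hk : k < row.length)
    (hall : ∀ x ∈ row.drop k, x = row.headD 0) : row[k] = row.headD 0 :=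
  hall _ (by rw [List.drop_eq_getElem_cons hk]; exact List.mem_cons_self)

theorem D_mono (row : List Int) (k : Nat)
    (hall : ∀ x ∈ row.drop k, x = row.headD 0) :
    ∀ x ∈ row.drop (k + 1), x = row.headD 0 := by
  intro x hx
  apply hall
  have h1 : List.drop (k + 1) row = List.drop 1 (List.drop k row) := by
    rw [List.drop_drop]
  exact List.drop_subset 1 _ (h1 ▸ hx)

theorem A_pos (game : List (List Int)) (i : Int) (v : List (List (List Bool))) :
    ∀ (n : Nat) (j : Int), (6 - j).toNat ≤ n → j ≤ 6 → 1 ≤ max_horiz game i j v := by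
  intro n
  induction n with
  | zero =>
    intro j hm h2
    have : j = 6 := by omega
    subst this
    rw [max_horiz, if_pos rfl]
  | succ m ih =>
    intro j hm h2
    by_cases hj6 : j = 6
    · subst hj6; rw [max_horiz, if_pos rfl]
    · rw [max_horiz, if_neg hj6, if_neg (by omega)]
      split_ifs
      · omega
      · have := ih (j + 1) (by omega) (by omega)
        omega

theorem A_shift (game : List (List Int)) (i : Int) (v : List (List (List Bool)))
    (row : List Int) (hrow : row = (PySem.List.pyGet? game i).getD []) (hl : row.length = 7) :
    ∀ (n : Nat) (j : Int), -7 ≤ j → j ≤ -1 → (-j).toNat ≤ n →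
    (∀ x ∈ row.drop (j + 7).toNat, x = row.headD 0) →
    max_horiz game i j v = max_horiz game i 0 v + (-j) := by
  intro n
  induction n with
  | zero => intro j h1 h2 hm; omega
  | succ m ih =>
    intro j h1 h2 hm hall
    have hsh : PySem.List.pyGet? row j = PySem.List.pyGet? row (j + 7) :=
      pyGet?_neg_shift row j hl (by omega) (by omega)
    have hcj : cellD row (j + 7) = row.headD 0 := by
      rw [cellD_getElem row (j + 7) (by omega) (by omega)]
      exact head_drop row _ (by omega) hall
    rw [max_horiz, if_neg (by omega), if_neg (by omega), ← hrow]
    by_cases hj1 : j = -1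
    · subst hj1
      have hc0 : cellD row ((-1 : Int) + 1) = row.headD 0 := by
        have := cellD_getElem row 0 (by omega) (by omega)
        rw [headD_getElem row (by omega)]
        simpa using this
      rw [if_neg (by
        show ¬ cellD row (-1) ≠ cellD row ((-1 : Int) + 1)
        have hx : cellD row (-1) = cellD row ((-1 : Int) + 7) := by
          simp only [cellD]; rw [hsh]
        rw [hx, hcj, hc0, ne_eq, not_not])]
      norm_num
    · have hall' : ∀ x ∈ row.drop ((j + 1) + 7).toNat, x = row.headD 0 := by
        have h' : ((j + 1) + 7).toNat = (j + 7).toNat + 1 := by omega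
        rw [h']
        exact D_mono row _ hall
      have hcj1 : cellD row (j + 1) = row.headD 0 := by
        have hs1 : PySem.List.pyGet? row (j + 1) = PySem.List.pyGet? row ((j + 1) + 7) :=
          pyGet?_neg_shift row (j + 1) hl (by omega) (by omega)
        simp only [cellD]
        rw [hs1, ← cellD]
        rw [cellD_getElem row ((j + 1) + 7) (by omega) (by omega)]
        exact head_drop row _ (by omega) hall'
      rw [if_neg (by
        show ¬ cellD row j ≠ cellD row (j + 1)
        have hx : cellD row j = cellD row (j + 7) := by
          simp only [cellD]; rw [hsh]
        rw [hx, hcj, hcj1, ne_eq, not_not])]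
      rw [ih (j + 1) (by omega) (by omega) (by omega) hall']
      ring

theorem runEnd_all (row : List Int) (hl : row.length = 7) :
    ∀ (n : Nat) (e : Int), 0 ≤ e → e ≤ 6 → (6 - e).toNat ≤ n →
    (∀ x ∈ row.drop e.toNat, x = row.headD 0) →
    runEnd row e = 6 := by
  intro n
  induction n with
  | zero =>
    intro e h1 h2 hm _
    have : e = 6 := by omega
    subst this
    exact runEnd_stop row 6 (by omega)
  | succ m ih =>
    intro e h1 h2 hm hall
    by_cases he : e = 6
    · subst he; exact runEnd_stop row 6 (by omega)
    · have hall' : ∀ x ∈ row.drop (e + 1).toNat, x = row.headD 0 := by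
        have h' : (e + 1).toNat = e.toNat + 1 := by omega
        rw [h']
        exact D_mono row _ hall
      have hce : cellD row e = row.headD 0 := by
        rw [cellD_getElem row e (by omega) (by omega)]
        exact head_drop row _ (by omega) hall
      have hce1 : cellD row (e + 1) = row.headD 0 := by
        rw [cellD_getElem row (e + 1) (by omega) (by omega)]
        exact head_drop row _ (by omega) hall'
      rw [runEnd_step row e (by omega) (by simp only [cellD] at hce hce1; rw [hce, hce1])]
      exact ih (e + 1) (by omega) (by omega) (by omega) hall'

-- final assembly tests
theorem witA :
    max_horiz [[0, 0, 0, 0, 0, 0, 0]] 0 (-1)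
      [[[false], [false], [false], [false], [false], [false], [false]]] = 8 := by
  rw [max_horiz]; norm_num [PySem.List.pyGet?, PySem.List.pyIdx?]
  rw [max_horiz]; norm_num [PySem.List.pyGet?, PySem.List.pyIdx?]
  rw [max_horiz]; norm_num [PySem.List.pyGet?, PySem.List.pyIdx?]
  rw [max_horiz]; norm_num [PySem.List.pyGet?, PySem.List.pyIdx?]
  rw [max_horiz]; norm_num [PySem.List.pyGet?, PySem.List.pyIdx?]
  rw [max_horiz]; norm_num [PySem.List.pyGet?, PySem.List.pyIdx?]
  rw [max_horiz]; norm_num [PySem.List.pyGet?, PySem.List.pyIdx?]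
  rw [max_horiz]; norm_num [PySem.List.pyGet?, PySem.List.pyIdx?]
  decide

theorem witB :
    max_horiz_alt [[0, 0, 0, 0, 0, 0, 0]] 0 (-1)
      [[[false], [false], [false], [false], [false], [false], [false]]] = 1 := by
  rw [max_horiz_alt]
  norm_num [PySem.List.pyGet?, PySem.List.pyIdx?]
  rw [runEnd]
  norm_num

theorem alt_val (game : List (List Int)) (i : Int) (j : Int) (v : List (List (List Bool)))
    (hl : ((PySem.List.pyGet? game i).getD []).length = 7) (h1 : -7 ≤ j) (h2 : j ≤ -1)
    (hall : ∀ x ∈ ((PySem.List.pyGet? game i).getD []).drop (j + 7).toNat,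
      x = ((PySem.List.pyGet? game i).getD []).headD 0) :
    max_horiz_alt game i j v = -j := by
  have h6 := runEnd_all _ hl 13 (j + 7) (by omega) (by omega) (by omega) hall
  rw [max_horiz_alt, if_neg (by omega)]
  simp only [hl]
  norm_num
  rw [if_neg (by omega), h6]
  ring

-- ===== VERDICT (by name: the statement is the Claim_ definition above) =====
theorem max_horiz_spec : Claim_unchanged_max_horiz := by
  intro game i j visited _ hPre hND
  unfold D_max_horiz at hND
  by_cases h7 : 7 ≤ j
  · rw [max_horiz, if_neg (by omega), if_pos (by omega), max_horiz_alt, if_pos h7]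
  · rcases hPre with h | ⟨_, _, _, _, hj, hlen⟩
    · omega
    · by_cases hpos : 0 ≤ j
      · rw [if_pos hpos] at hlen
        have hmain := A_eq_runEnd_nn game i visited _ rfl (6 - j).toNat j hpos (by omega) (by omega)
        rw [hmain, max_horiz_alt, if_neg h7]
        norm_num [hpos]
      · rw [if_neg hpos] at hlen
        have hmain := A_eq_runEnd game i visited _ rfl hlen (6 - j).toNat j hj (by omega) (by omega)
          (fun hneg hall => hND ⟨hj, by omega,
            fun x hx => List.mem_singleton.mpr (hall x hx)⟩)
        rw [hmain, max_horiz_alt, if_neg h7]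
        simp only [hlen]
        norm_num

theorem max_horiz_changed : Claim_changed_max_horiz := by
  unfold Claim_changed_max_horiz
  exact ⟨by decide, by decide, by decide, witA, witB, by decide⟩

theorem max_horiz_tight : Claim_exact_max_horiz := by
  intro game i j visited _ hPre hD
  unfold D_max_horiz at hD
  obtain ⟨h1, h2, hsub⟩ := hD
  have hall : ∀ x ∈ ((PySem.List.pyGet? game i).getD []).drop (j + 7).toNat,
      x = ((PySem.List.pyGet? game i).getD []).headD 0 :=
    fun x hx => List.mem_singleton.mp (hsub hx)
  rcases hPre with h | ⟨_, _, _, _, hj, hlen⟩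
  · omega
  · rw [if_neg (by omega)] at hlen
    have hA := A_shift game i visited _ rfl hlen 7 j h1 h2 (by omega) hall
    have hpos := A_pos game i visited 6 0 (by decide) (by decide)
    have halt := alt_val game i j visited hlen h1 h2 hall
    rw [hA, halt]
    omega
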